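-- pv_equiv track=rewrite | github.com/obn11/COSC | COSC261 Compilers/Assignment1 Alg.py | thingshelp
-- ===== SOURCE A (Python) =====
-- def thingshelp(list1, list2, stuff, i, j=0):
--     if j != len(list2):
--         if list2[j] > list1[i]:
--             stuff.append((list1[i], list2[j]))
--         j += 1
--         return thingshelp(list1, list2, stuff, i, j)
--     else:
--         return stuff
-- ===== SOURCE B (Python) =====
-- def thingshelp(list1, list2, stuff, i, j=0):
--     for k in range(j, len(list2)):
--         if list2[k] > list1[i]:
--             stuff.append((list1[i], list2[k]))
--     return stuff
-- ===== Notes on version B (the rewrite author's own statement) =====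
-- stated objective: idiomatic
-- what changed: Replaces A's tail recursion (one Python call frame per remaining list2 element, hitting the recursion limit on long lists) with a single iterative for-loop over range(j, len(list2)).
import Mathlib
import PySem

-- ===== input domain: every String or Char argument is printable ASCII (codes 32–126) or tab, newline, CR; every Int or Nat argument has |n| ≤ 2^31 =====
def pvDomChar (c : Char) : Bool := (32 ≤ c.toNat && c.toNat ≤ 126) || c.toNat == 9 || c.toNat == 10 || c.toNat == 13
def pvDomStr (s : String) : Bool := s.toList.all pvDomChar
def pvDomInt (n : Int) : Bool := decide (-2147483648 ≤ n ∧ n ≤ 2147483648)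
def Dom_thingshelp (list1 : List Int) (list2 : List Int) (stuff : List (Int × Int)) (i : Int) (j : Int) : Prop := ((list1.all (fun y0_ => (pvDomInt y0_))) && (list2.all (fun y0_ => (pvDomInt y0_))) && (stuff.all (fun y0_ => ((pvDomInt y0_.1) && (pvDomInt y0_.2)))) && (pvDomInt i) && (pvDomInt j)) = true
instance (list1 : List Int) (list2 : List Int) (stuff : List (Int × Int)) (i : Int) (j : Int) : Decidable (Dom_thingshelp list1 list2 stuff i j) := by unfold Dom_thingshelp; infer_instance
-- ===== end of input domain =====

-- B replaces A's tail recursion by a single iterative loop over range(j, len(list2)) (idiomatic; no per-element call frame).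

-- ===== PORT A =====
-- Literal port of A's tail recursion; list accesses via pyGet? (none = IndexError,
-- the guard returning stuff there only makes the recursion total — excluded by Pre_).
def thingshelp (list1 : List Int) (list2 : List Int) (stuff : List (Int × Int)) (i : Int) (j : Int) : List (Int × Int) :=
  if j ≠ (list2.length : Int) then
    if h : PySem.Raise.InRange list2.length j ∧ PySem.Raise.InRange list1.length i then
      let v := PySem.List.pyGetD list2 j 0
      let u := PySem.List.pyGetD list1 i 0
      thingshelp list1 list2 (if v > u then stuff ++ [(u, v)] else stuff) i (j + 1)
    else stuff  -- IndexError on list2[j] or list1[i]; excluded by Pre_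
  else
    stuff
termination_by ((list2.length : Int) - j).toNat
decreasing_by
  rcases h with ⟨⟨_, hlt⟩, _⟩
  omega

-- ===== PORT B =====
-- Literal port of B: fold over range(j, len(list2)).
def thingshelp_alt (list1 : List Int) (list2 : List Int) (stuff : List (Int × Int)) (i : Int) (j : Int) : List (Int × Int) :=
  (PySem.List.pyRange j (list2.length : Int) 1).foldl
    (fun acc k =>
      match PySem.List.pyGet? list2 k, PySem.List.pyGet? list1 i with
      | some v, some u => if v > u then acc ++ [(u, v)] else acc
      | _, _ => acc)
    stuff

-- ===== PRECONDITION & SPEC =====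
-- Pre_ excludes exactly the inputs where A raises IndexError: a start index j outside
-- [-len(list2), len(list2)], or (when the scan is nonempty, j ≠ len(list2)) an index i
-- out of range for list1.
def Pre_thingshelp (list1 : List Int) (list2 : List Int) (stuff : List (Int × Int)) (i : Int) (j : Int) : Prop :=
  (-(list2.length : Int) ≤ j ∧ j ≤ (list2.length : Int)) ∧
  (j = (list2.length : Int) ∨ PySem.Raise.InRange list1.length i)
instance (list1 : List Int) (list2 : List Int) (stuff : List (Int × Int)) (i : Int) (j : Int) : Decidable (Pre_thingshelp list1 list2 stuff i j) := by unfold Pre_thingshelp; infer_instance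

def pvWitness_thingshelp : List Int × List Int × (List (Int × Int)) × Int × Int := ([1, 3], [2, 0, 5], [(9, 9)], 0, 1)

def Spec_thingshelp (list1 : List Int) (list2 : List Int) (stuff : List (Int × Int)) (i : Int) (j : Int) (out : List (Int × Int)) : Prop := out = thingshelp_alt list1 list2 stuff i j
instance (list1 : List Int) (list2 : List Int) (stuff : List (Int × Int)) (i : Int) (j : Int) (out : List (Int × Int)) : Decidable (Spec_thingshelp list1 list2 stuff i j out) := by unfold Spec_thingshelp; infer_instance

-- ===== CLAIM (what is proved, stated in full; the proofs are below) =====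
def Claim_equal_thingshelp : Prop := ∀ (list1 : List Int) (list2 : List Int) (stuff : List (Int × Int)) (i : Int) (j : Int), Dom_thingshelp list1 list2 stuff i j → Pre_thingshelp list1 list2 stuff i j → Spec_thingshelp list1 list2 stuff i j (thingshelp list1 list2 stuff i j)
-- ===== LEMMAS AND PROOFS =====

theorem pyGet?_eq_some_pyGetD (xs : List Int) (k : Int)
    (h : PySem.Raise.InRange xs.length k) :
    PySem.List.pyGet? xs k = some (PySem.List.pyGetD xs k 0) := by
  obtain ⟨h1, h2⟩ := h
  by_cases hk : 0 ≤ k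
  · rw [PySem.List.pyGet?_eq_some_getElem xs hk h2, PySem.List.pyGetD_eq_getElem xs 0 hk h2]
  · have hm1 : 0 < (-k).toNat := by omega
    have hm2 : (-k).toNat ≤ xs.length := by omega
    have hk' : k = -(((-k).toNat : Nat) : Int) := by omega
    rw [hk', PySem.List.pyGet?_neg_natCast xs _ hm1 hm2, PySem.List.pyGetD_neg_natCast xs _ 0 hm1 hm2,
      List.getElem?_eq_getElem (by omega)]

-- Main induction, on the number of remaining indices (len(list2) - j).
theorem thingshelp_eq_alt (list1 list2 : List Int) (i : Int)
    (hi : PySem.Raise.InRange list1.length i) :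
    ∀ (n : Nat) (j : Int) (stuff : List (Int × Int)),
      -(list2.length : Int) ≤ j → j ≤ (list2.length : Int) →
      n = (((list2.length : Int)) - j).toNat →
      thingshelp list1 list2 stuff i j = thingshelp_alt list1 list2 stuff i j := by
  intro n
  induction n with
  | zero =>
    intro j stuff _ hle hn
    have hj : j = (list2.length : Int) := by omega
    rw [thingshelp, thingshelp_alt, PySem.List.pyRange_one_eq_nil (by omega)]
    simp [hj]
  | succ m ih =>
    intro j stuff hlo hle hn
    have hjlt : j < (list2.length : Int) := by omega
    have hv : PySem.List.pyGet? list2 j = some (PySem.List.pyGetD list2 j 0) :=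
      pyGet?_eq_some_pyGetD list2 j ⟨hlo, hjlt⟩
    have hu : PySem.List.pyGet? list1 i = some (PySem.List.pyGetD list1 i 0) :=
      pyGet?_eq_some_pyGetD list1 i hi
    have hjr : PySem.Raise.InRange list2.length j := ⟨hlo, hjlt⟩
    rw [thingshelp]
    rw [if_pos (show j ≠ (list2.length : Int) by omega), dif_pos ⟨hjr, hi⟩]
    rw [thingshelp_alt, PySem.List.pyRange_one_cons hjlt]
    simp only [List.foldl_cons, hv, hu]
    rw [ih (j + 1) _ (by omega) (by omega) (by omega)]
    simp only [thingshelp_alt, hu]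

-- ===== VERDICT (by name: the statement is the Claim_ definition above) =====
theorem thingshelp_spec : Claim_equal_thingshelp := by
  intro list1 list2 stuff i j _ hpre
  unfold Spec_thingshelp
  rcases hpre with ⟨⟨hlo, hle⟩, hj | hi⟩
  · rw [thingshelp, thingshelp_alt, PySem.List.pyRange_one_eq_nil (by omega)]
    simp [hj]
  · exact thingshelp_eq_alt list1 list2 i hi _ j stuff hlo hle rfl
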